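-- pv_equiv track=rewrite | github.com/baditaflorin/ServerClaw | scripts/adr_discovery.py | _count_by_order
-- ===== SOURCE A (Python) =====
-- from collections import Counter, defaultdict
--
-- def _count_by_order(values: list[str], order: tuple[str, ...]) -> dict[str, int]:
--     counts = Counter(values)
--     ordered: dict[str, int] = {}
--     for key in order:
--         if counts.get(key):
--             ordered[key] = counts[key]
--     for key in sorted(counts):
--         if key not in ordered:
--             ordered[key] = counts[key]
--     return ordered
-- ===== SOURCE B (Python) =====
-- from collections import Counter
--
--
-- def _count_by_order(values: list[str], order: tuple[str, ...]) -> dict[str, int]: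
--     counts = Counter(values)
--     rank: dict[str, int] = {}
--     for i, key in enumerate(order):
--         rank.setdefault(key, i)
--     n = len(order)
--     return {key: counts[key]
--             for key in sorted(counts, key=lambda k: (rank.get(k, n), k))}
-- ===== Notes on version B (the rewrite author's own statement) =====
-- stated objective: alternative
-- what changed: A builds the ordered dict in two differently-shaped output passes (a priority pass over `order`, then a sorted pass inserting the not-yet-seen keys); B instead precomputes a first-index rank table for `order` and emits the whole dict in one comprehension over the unique keys sorted by the composite key (rank.get(k, n), k).
import Mathlib
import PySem

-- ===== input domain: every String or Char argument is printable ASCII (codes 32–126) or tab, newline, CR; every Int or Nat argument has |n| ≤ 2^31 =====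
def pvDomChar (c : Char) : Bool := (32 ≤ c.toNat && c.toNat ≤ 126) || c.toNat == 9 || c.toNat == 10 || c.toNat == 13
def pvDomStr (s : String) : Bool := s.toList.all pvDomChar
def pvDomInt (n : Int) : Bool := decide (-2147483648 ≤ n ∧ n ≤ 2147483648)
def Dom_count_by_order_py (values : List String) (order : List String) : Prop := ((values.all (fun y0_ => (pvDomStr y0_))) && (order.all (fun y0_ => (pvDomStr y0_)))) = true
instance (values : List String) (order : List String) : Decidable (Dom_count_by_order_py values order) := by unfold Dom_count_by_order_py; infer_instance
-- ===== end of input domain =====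

-- B replaces A's two output passes (priority pass over `order`, then a sorted pass over the
-- remaining keys) by one ranked sort of the unique keys under the composite key
-- (first-index-in-order-or-len, key); objective: alternative decomposition, same asymptotic cost.

-- ===== PORT A =====
-- counts = Counter(values); first loop inserts priority keys with truthy counts;
-- second loop inserts the remaining keys of sorted(counts).
def count_by_order_py (values : List String) (order : List String) : List (String × Int) :=
  let counts := PySem.Dict.counter values
  let ordered1 := order.foldl (fun d key =>
      if counts.getD key 0 ≠ 0 then d.insert key (counts.getD key 0) else d)
    PySem.Dict.empty
  let ordered2 := (PySem.List.sorted counts.keys (fun k => k) false).foldl (fun d key =>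
      if d.contains key then d else d.insert key (counts.getD key 0)) ordered1
  ordered2.items

-- ===== PORT B =====
-- counts = Counter(values); rank = first index of each key in order (setdefault loop);
-- one dict comprehension over the keys sorted by the composite key (rank.get(k, n), k).
def count_by_order_py_alt (values : List String) (order : List String) : List (String × Int) :=
  let counts := PySem.Dict.counter values
  let rank := (PySem.List.enumerate order 0).foldl
      (fun d p => d.setdefault p.2 p.1) (PySem.Dict.empty : PySem.Dict String Int)
  let n : Int := (order.length : Int)
  let ks := PySem.List.sorted2 counts.keys (fun k => rank.getD k n) (fun k => k) false
  (ks.foldl (fun d key => d.insert key (counts.getD key 0)) PySem.Dict.empty).items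

-- ===== PRECONDITION & SPEC =====
def Spec_count_by_order_py (values : List String) (order : List String) (out : List (String × Int)) : Prop := out = count_by_order_py_alt values order
instance (values : List String) (order : List String) (out : List (String × Int)) : Decidable (Spec_count_by_order_py values order out) := by unfold Spec_count_by_order_py; infer_instance

-- ===== CLAIM (what is proved, stated in full; the proofs are below) =====
def Claim_equal_count_by_order_py : Prop := ∀ (values : List String) (order : List String), Dom_count_by_order_py values order → Spec_count_by_order_py values order (count_by_order_py values order)

-- ===== LEMMAS AND PROOFS =====

theorem pv_sorted2_eq_sorted_lex {α : Type} (xs : List α) (k1 : α → Int) (k2 : α → String) :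
    PySem.List.sorted2 xs k1 k2 false
      = PySem.List.sorted xs (fun x => toLex (k1 x, k2 x)) false := by
  rw [PySem.List.sorted_eq_foldl_insertBy]
  simp only [PySem.List.sorted2, if_neg (by decide : ¬ (false = true))]
  congr 1
  funext acc x
  congr 1
  funext a b
  rw [Bool.eq_iff_iff]
  simp only [Bool.or_eq_true, Bool.and_eq_true, Bool.not_eq_true', decide_eq_true_eq,
    decide_eq_false_iff_not, Prod.Lex.toLex_lt_toLex]
  constructor
  · rintro (h | ⟨h1, h2⟩)
    · exact Or.inl h
    · rcases lt_trichotomy (k1 a) (k1 b) with h' | h' | h'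
      · exact Or.inl h'
      · exact Or.inr ⟨h', h2⟩
      · exact absurd h' h1
  · rintro (h | ⟨h1, h2⟩)
    · exact Or.inl h
    · exact Or.inr ⟨by simp [h1], h2⟩

theorem pv_getD_foldl_insert (v : String → Int) :
    ∀ (l : List String) (d : PySem.Dict String Int) (j : String),
      (l.foldl (fun d k => d.insert k (v k)) d).getD j 0
        = if j ∈ l then v j else d.getD j 0 := by
  intro l
  induction l with
  | nil => intro d j; simp
  | cons x t ih =>
    intro d j
    simp only [List.foldl_cons, ih, List.mem_cons]
    by_cases hjt : j ∈ t
    · simp [hjt]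
    · by_cases hjx : j = x
      · subst hjx; simp [hjt, PySem.Dict.getD_insert_self]
      · simp [hjt, hjx, PySem.Dict.getD_insert_of_ne d (v x) 0 hjx]

theorem pv_loop2_items (v : String → Int) :
    ∀ (l : List String) (d : PySem.Dict String Int), d.keys.Nodup → l.Nodup →
      (l.foldl (fun d k => if d.contains k then d else d.insert k (v k)) d).items
        = d.items ++ (l.filter (fun k => !d.contains k)).map (fun k => (k, v k)) := by
  intro l
  induction l with
  | nil => intro d _ _; simp
  | cons x t ih =>
    intro d hnd hl
    rcases List.nodup_cons.mp hl with ⟨hxt, ht⟩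
    simp only [List.foldl_cons, List.filter_cons]
    by_cases hc : d.contains x = true
    · rw [if_pos hc, ih d hnd ht]
      simp [hc]
    · have hc' : d.contains x = false := by simpa using hc
      rw [if_neg hc]
      have hitems := PySem.Dict.items_insert_of_not_contains d (v x) hc'
      rw [ih (d.insert x (v x)) (PySem.Dict.nodup_keys_insert d x (v x) hnd) ht, hitems]
      have hfil : t.filter (fun k => !(d.insert x (v x)).contains k) = t.filter (fun k => !d.contains k) := by
        apply List.filter_congr
        intro k hk
        have hkx : (k == x) = false := by
          simp only [beq_eq_false_iff_ne]; intro h; exact hxt (h ▸ hk)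
        rw [PySem.Dict.contains_insert, hkx, Bool.false_or]
      rw [hfil]
      simp [hc']

theorem pv_ofList_filter (p : String → Bool) :
    ∀ (l : List String) (s : PySem.Set String),
      (l.filter p).foldl PySem.Set.add (s.filter p)
        = (l.foldl PySem.Set.add s).filter p := by
  intro l
  induction l with
  | nil => intro s; simp
  | cons x t ih =>
    intro s
    simp only [List.filter_cons, List.foldl_cons]
    by_cases hp : p x = true
    · rw [if_pos hp]
      simp only [List.foldl_cons]
      have : PySem.Set.add (s.filter p) x = (PySem.Set.add s x).filter p := by
        by_cases hm : x ∈ s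
        · have h1 : PySem.Set.add s x = s := by simp [PySem.Set.add, PySem.Set.contains, hm]
          have h2 : PySem.Set.add (s.filter p) x = s.filter p := by
            simp [PySem.Set.add, PySem.Set.contains, List.mem_filter, hm, hp]
          rw [h1, h2]
        · have h1 : PySem.Set.add s x = s ++ [x] := by simp [PySem.Set.add, PySem.Set.contains, hm]
          have h2 : PySem.Set.add (s.filter p) x = s.filter p ++ [x] := by
            simp [PySem.Set.add, PySem.Set.contains, List.mem_filter, hm]
          rw [h1, h2, List.filter_append, List.filter_cons]
          simp [hp]
      rw [this, ih]
    · rw [if_neg hp]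
      have : (PySem.Set.add s x).filter p = s.filter p := by
        by_cases hm : x ∈ s
        · simp [PySem.Set.add, PySem.Set.contains, hm]
        · have h1 : PySem.Set.add s x = s ++ [x] := by simp [PySem.Set.add, PySem.Set.contains, hm]
          rw [h1, List.filter_append, List.filter_cons]
          simp [hp]
      rw [← this, ih]

theorem pv_rank_fold (n : Int) :
    ∀ (l : List String) (s : Int) (d : PySem.Dict String Int),
      d.keys.Nodup →
      (∀ k, d.contains k = true → d.getD k n < s) →
      d.keys.Pairwise (fun a b => d.getD a n < d.getD b n) →
      ((PySem.List.enumerate l s).foldl (fun d p => d.setdefault p.2 p.1) d).keys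
          = PySem.Set.update d.keys l
      ∧ ((PySem.List.enumerate l s).foldl (fun d p => d.setdefault p.2 p.1) d).keys.Nodup
      ∧ (∀ k, ((PySem.List.enumerate l s).foldl (fun d p => d.setdefault p.2 p.1) d).contains k = true →
            ((PySem.List.enumerate l s).foldl (fun d p => d.setdefault p.2 p.1) d).getD k n < s + (l.length : Int))
      ∧ ((PySem.List.enumerate l s).foldl (fun d p => d.setdefault p.2 p.1) d).keys.Pairwise
          (fun a b => ((PySem.List.enumerate l s).foldl (fun d p => d.setdefault p.2 p.1) d).getD a n
                    < ((PySem.List.enumerate l s).foldl (fun d p => d.setdefault p.2 p.1) d).getD b n) := by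
  intro l
  induction l with
  | nil =>
    intro s d hnd hb hp
    simp only [PySem.List.enumerate_nil, List.foldl_nil, List.length_nil, Nat.cast_zero, add_zero]
    exact ⟨by simp [PySem.Set.update], hnd, hb, hp⟩
  | cons x t ih =>
    intro s d hnd hb hp
    rw [PySem.List.enumerate_cons]
    simp only [List.foldl_cons]
    have hupd : PySem.Set.update d.keys (x :: t) = PySem.Set.update (d.setdefault x s).keys t := by
      by_cases hc : d.contains x = true
      · rw [PySem.Dict.setdefault_of_contains d s hc]
        have hmem : x ∈ d.keys := (PySem.Dict.contains_iff_mem_keys d x).mp hc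
        simp [PySem.Set.update, PySem.Set.add, PySem.Set.contains, hmem]
      · have hc' : d.contains x = false := by simpa using hc
        rw [PySem.Dict.setdefault_of_not_contains d s hc',
            PySem.Dict.keys_insert_of_not_contains d s hc']
        have hmem : x ∉ d.keys := fun h => by
          simp [(PySem.Dict.contains_iff_mem_keys d x).mpr h] at hc'
        simp [PySem.Set.update, PySem.Set.add, PySem.Set.contains, hmem]
    by_cases hc : d.contains x = true
    · rw [PySem.Dict.setdefault_of_contains d s hc] at hupd ⊢
      have hb' : ∀ k, d.contains k = true → d.getD k n < s + 1 := fun k hk =>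
        lt_trans (hb k hk) (by omega)
      obtain ⟨h1, h2, h3, h4⟩ := ih (s + 1) d hnd hb' hp
      refine ⟨hupd ▸ h1, h2, fun k hk => ?_, h4⟩
      have := h3 k hk
      simp only [List.length_cons] at *
      push_cast at *
      omega
    · have hc' : d.contains x = false := by simpa using hc
      rw [PySem.Dict.setdefault_of_not_contains d s hc'] at hupd ⊢
      set d' := d.insert x s with hd'
      have hxmem : x ∉ d.keys := fun h => by
        simp [(PySem.Dict.contains_iff_mem_keys d x).mpr h] at hc'
      have hkeys' : d'.keys = d.keys ++ [x] := PySem.Dict.keys_insert_of_not_contains d s hc'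
      have hnd' : d'.keys.Nodup := PySem.Dict.nodup_keys_insert d x s hnd
      have hgd_old : ∀ k ∈ d.keys, d'.getD k n = d.getD k n := fun k hk =>
        PySem.Dict.getD_insert_of_ne d s n (fun h => hxmem (h ▸ hk))
      have hb' : ∀ k, d'.contains k = true → d'.getD k n < s + 1 := by
        intro k hk
        rw [PySem.Dict.contains_insert] at hk
        rcases Bool.or_eq_true_iff.mp hk with h | h
        · have : k = x := by simpa using h
          subst this
          rw [PySem.Dict.getD_insert_self]; omega
        · have hkx : k ≠ x := fun he => by
            subst he; exact hxmem ((PySem.Dict.contains_iff_mem_keys d k).mp h)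
          rw [PySem.Dict.getD_insert_of_ne d s n hkx]
          exact lt_trans (hb k h) (by omega)
      have hp' : d'.keys.Pairwise (fun a b => d'.getD a n < d'.getD b n) := by
        rw [hkeys']
        rw [List.pairwise_append]
        refine ⟨?_, List.pairwise_singleton _ _, ?_⟩
        · refine hp.imp_of_mem ?_
          intro a b ha hb'' hab
          rw [hgd_old a ha, hgd_old b hb'']; exact hab
        · intro a ha b hbm
          have hbx : b = x := by simpa using hbm
          subst hbx
          rw [hgd_old a ha, PySem.Dict.getD_insert_self]
          exact hb a ((PySem.Dict.contains_iff_mem_keys d a).mpr ha)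
      obtain ⟨h1, h2, h3, h4⟩ := ih (s + 1) d' hnd' hb' hp'
      refine ⟨hupd ▸ h1, h2, fun k hk => ?_, h4⟩
      have := h3 k hk
      simp only [List.length_cons] at *
      push_cast at *
      omega

-- Main equivalence.
theorem pv_main (values order : List String) :
    count_by_order_py values order = count_by_order_py_alt values order := by
  unfold count_by_order_py count_by_order_py_alt
  simp only []
  set counts := PySem.Dict.counter values with hcounts
  rw [PySem.List.foldl_ite_eq_foldl_filter (fun key => counts.getD key 0 ≠ 0)
        (fun d key => d.insert key (counts.getD key 0)) order PySem.Dict.empty]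
  set L := order.filter (fun x => decide (counts.getD x 0 ≠ 0)) with hL
  set d1 := List.foldl (fun d key => d.insert key (counts.getD key 0)) PySem.Dict.empty L with hd1
  set sortedK := PySem.List.sorted counts.keys (fun k => k) false with hsK
  set n : Int := (order.length : Int) with hn
  -- counts facts
  have hKnodup : counts.keys.Nodup := PySem.Dict.nodup_keys_counter values
  have hsKnodup : sortedK.Nodup := by
    rw [hsK]
    exact ((PySem.List.sorted_perm counts.keys (fun k => k) false).nodup_iff).mpr hKnodup
  have hmemK : ∀ k, k ∈ counts.keys ↔ k ∈ values := by
    intro k; rw [hcounts, PySem.Dict.keys_counter]; exact PySem.Set.mem_ofList values k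
  have hpK : ∀ k, k ∈ counts.keys → (decide (counts.getD k 0 ≠ 0)) = true := by
    intro k hk
    have hgc : counts.getD k 0 = (values.count k : Int) := by
      rw [hcounts]; exact PySem.Dict.getD_counter values k
    have h1 : 0 < values.count k := List.count_pos_iff.mpr ((hmemK k).mp hk)
    simp only [hgc, ne_eq, decide_eq_true_eq]
    omega
  -- d1 facts
  have hd1keys : d1.keys = PySem.Set.ofList L := by
    rw [hd1, PySem.Dict.keys_foldl_insert L (fun d key => counts.getD key 0) PySem.Dict.empty,
        PySem.Dict.keys_empty, PySem.Set.ofList_eq_foldl]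
    rfl
  have hd1nodup : d1.keys.Nodup := by
    rw [hd1]
    exact PySem.Dict.nodup_keys_foldl_insert L _ _ (by rw [PySem.Dict.keys_empty]; exact List.nodup_nil)
  have hd1items : d1.items = (PySem.Set.ofList L).map (fun k => (k, counts.getD k 0)) := by
    rw [PySem.Dict.items_eq_map_keys d1 hd1nodup 0, hd1keys]
    apply List.map_congr_left
    intro k hk
    have hkL : k ∈ L := (PySem.Set.mem_ofList L k).mp hk
    rw [hd1, pv_getD_foldl_insert (fun k => counts.getD k 0) L PySem.Dict.empty k, if_pos hkL]
  have hmemP : ∀ k, k ∈ PySem.Set.ofList L ↔ (k ∈ order ∧ k ∈ counts.keys) := by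
    intro k
    rw [PySem.Set.mem_ofList, hL, List.mem_filter]
    constructor
    · rintro ⟨h1, h2⟩
      refine ⟨h1, ?_⟩
      have hne : counts.getD k 0 ≠ 0 := of_decide_eq_true h2
      rw [hcounts, PySem.Dict.getD_counter] at hne
      have hkv : k ∈ values := by
        by_contra hnv
        exact hne (by rw [List.count_eq_zero.mpr hnv]; rfl)
      exact (hmemK k).mpr hkv
    · rintro ⟨h1, h2⟩
      exact ⟨h1, hpK k h2⟩
  have hcont_d1 : ∀ k, d1.contains k = true ↔ (k ∈ order ∧ k ∈ counts.keys) := by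
    intro k
    rw [PySem.Dict.contains_iff_mem_keys, hd1keys]
    exact hmemP k
  -- A's second loop
  rw [pv_loop2_items (fun k => counts.getD k 0) sortedK d1 hd1nodup hsKnodup, hd1items]
  set R := sortedK.filter (fun k => !d1.contains k) with hR
  have hmemR : ∀ k, k ∈ R ↔ (k ∈ counts.keys ∧ k ∉ order) := by
    intro k
    rw [hR, List.mem_filter, hsK, PySem.List.mem_sorted]
    constructor
    · rintro ⟨h1, h2⟩
      refine ⟨h1, fun ho => ?_⟩
      have hcc := (hcont_d1 k).mpr ⟨ho, h1⟩
      simp [hcc] at h2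
    · rintro ⟨h1, h2⟩
      refine ⟨h1, ?_⟩
      simp only [Bool.not_eq_true']
      by_contra h
      rw [Bool.not_eq_false] at h
      exact h2 ((hcont_d1 k).mp h).1
  -- rank facts
  obtain ⟨hrk, hrknd, hrkb, hrkp⟩ := pv_rank_fold n order 0 PySem.Dict.empty
      (by rw [PySem.Dict.keys_empty]; exact List.nodup_nil)
      (by intro k hk; rw [PySem.Dict.contains_empty] at hk; cases hk)
      (by rw [PySem.Dict.keys_empty]; exact List.Pairwise.nil)
  set rank := List.foldl (fun d p => d.setdefault p.2 p.1)
      (PySem.Dict.empty : PySem.Dict String Int) (PySem.List.enumerate order 0) with hrankdef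
  have hrkeys : rank.keys = PySem.Set.ofList order := by
    rw [hrk, PySem.Dict.keys_empty, PySem.Set.ofList_eq_foldl]; rfl
  have hin : ∀ k, k ∈ order → rank.getD k n < n := by
    intro k hk
    have hc : rank.contains k = true := (PySem.Dict.contains_iff_mem_keys rank k).mpr
      (by rw [hrkeys]; exact (PySem.Set.mem_ofList order k).mpr hk)
    exact lt_of_lt_of_eq (hrkb k hc) (by rw [hn]; ring)
  have hout : ∀ k, k ∉ order → rank.getD k n = n := by
    intro k hk
    apply PySem.Dict.getD_of_not_contains
    by_contra h
    rw [Bool.not_eq_false] at h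
    have := (PySem.Dict.contains_iff_mem_keys rank k).mp h
    rw [hrkeys] at this
    exact hk ((PySem.Set.mem_ofList order k).mp this)
  -- the combined list P ++ R is a strictly-lex-increasing rearrangement of counts.keys
  have hPnodup : (PySem.Set.ofList L).Nodup := PySem.Set.nodup_ofList L
  have hRnodup : R.Nodup := by
    rw [hR]; exact List.Nodup.sublist List.filter_sublist hsKnodup
  have hPRnodup : (PySem.Set.ofList L ++ R).Nodup := by
    rw [List.nodup_append]
    refine ⟨hPnodup, hRnodup, ?_⟩
    intro a ha b hb hab
    subst hab
    exact ((hmemR a).mp hb).2 ((hmemP a).mp ha).1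
  have hperm : (PySem.Set.ofList L ++ R).Perm counts.keys := by
    rw [List.perm_ext_iff_of_nodup hPRnodup hKnodup]
    intro a
    rw [List.mem_append, hmemP a, hmemR a]
    by_cases ho : a ∈ order <;> simp [ho]
  have hPfilter : PySem.Set.ofList L = rank.keys.filter (fun x => decide (counts.getD x 0 ≠ 0)) := by
    rw [hrkeys, hL, PySem.Set.ofList_eq_foldl, PySem.Set.ofList_eq_foldl]
    have h := pv_ofList_filter (fun x => decide (counts.getD x 0 ≠ 0)) order []
    simpa using h
  have hPpair : (PySem.Set.ofList L).Pairwise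
      (fun a b => toLex (rank.getD a n, a) < toLex (rank.getD b n, b)) := by
    rw [hPfilter]
    exact (List.Pairwise.sublist List.filter_sublist hrkp).imp
      (fun h => Prod.Lex.toLex_lt_toLex.mpr (Or.inl h))
  have hsortpl : sortedK.Pairwise (fun a b => a < b) := by
    rw [hsK, hcounts, PySem.Dict.keys_counter]
    exact PySem.List.sorted_ofList_pairwise_lt values
  have hRpair : R.Pairwise (fun a b => toLex (rank.getD a n, a) < toLex (rank.getD b n, b)) := by
    have hRlt : R.Pairwise (fun a b => a < b) := by
      rw [hR]; exact List.Pairwise.sublist List.filter_sublist hsortpl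
    refine List.Pairwise.imp_of_mem ?_ hRlt
    intro a b ha hb hab
    have hna := hout a ((hmemR a).mp ha).2
    have hnb := hout b ((hmemR b).mp hb).2
    exact Prod.Lex.toLex_lt_toLex.mpr (Or.inr ⟨by rw [hna, hnb], hab⟩)
  have hpair : (PySem.Set.ofList L ++ R).Pairwise
      (fun a b => toLex (rank.getD a n, a) < toLex (rank.getD b n, b)) := by
    rw [List.pairwise_append]
    refine ⟨hPpair, hRpair, ?_⟩
    intro a ha b hb
    have h1 : rank.getD a n < n := hin a ((hmemP a).mp ha).1
    have h2 := hout b ((hmemR b).mp hb).2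
    exact Prod.Lex.toLex_lt_toLex.mpr (Or.inl (by rw [h2]; exact h1))
  have hks : PySem.List.sorted2 counts.keys (fun k => rank.getD k n) (fun k => k) false
      = PySem.Set.ofList L ++ R := by
    rw [pv_sorted2_eq_sorted_lex]
    exact PySem.List.sorted_eq_of_perm_of_pairwise_lt counts.keys _ _ hperm hpair
  rw [hks]
  rw [PySem.Dict.items_foldl_insert_fresh (PySem.Set.ofList L ++ R) (fun a => a)
      (fun a => counts.getD a 0) PySem.Dict.empty
      (fun a _ => PySem.Dict.contains_empty a)
      (by simpa using hPRnodup)]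
  simp [List.map_append]
  rfl

-- ===== VERDICT (by name: the statement is the Claim_ definition above) =====
theorem count_by_order_py_spec : Claim_equal_count_by_order_py := by
  intro values order _
  unfold Spec_count_by_order_py
  exact pv_main values order
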